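-- pv_equiv track=rewrite | github.com/nkw011/algorithm_training | programmers/kakao_recuitment/menu_renewal.py | solution
-- ===== SOURCE A (Python) =====
-- from itertools import combinations
-- from collections import defaultdict, Counter
--
-- def solution(orders, course):
--     result = []
--     for num in course:
--         candidate = []
--         for order in orders:
--             for arr in combinations(sorted(order), num):
--                 candidate.append("".join(arr))
--         most_common_cadidate = Counter(candidate).most_common()
--         result += [k for k, v in most_common_cadidate if v >
--                    1 and v == most_common_cadidate[0][1]]
--     return sorted(result)
-- ===== SOURCE B (Python) =====
-- def _combos(chars, k):
--     # all sorted k-letter selections of chars (a sorted list), as joined strings,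
--     # in the same order itertools.combinations yields them
--     if k == 0:
--         return [""]
--     if k < 0 or k > len(chars):
--         return []
--     rest = chars[1:]
--     return [chars[0] + t for t in _combos(rest, k - 1)] + _combos(rest, k)
--
-- def solution(orders, course):
--     result = []
--     for num in course:
--         cand = []
--         for order in orders:
--             cand += _combos(sorted(order), num)
--         cand.sort()
--         best, winners, run = 0, [], 0
--         n = len(cand)
--         for i, x in enumerate(cand):
--             run += 1
--             if i + 1 == n or cand[i + 1] != x:
--                 if run > best:
--                     best, winners = run, [x]
--                 elif run == best:
--                     winners.append(x)
--                 run = 0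
--         if best > 1:
--             result += winners
--     return sorted(result)
-- ===== Notes on version B (the rewrite author's own statement) =====
-- stated objective: alternative
-- what changed: B replaces hash counting (Counter) plus most_common()'s sort-by-count with a comparison-based strategy: it enumerates combinations with its own recursive generator producing joined strings directly, sorts the candidate list, and finds the maximal run length and its keys in one linear run-length scan; Pre_ excludes exactly the negative course sizes alongside a nonempty orders list, on which A's combinations() raises ValueError.
import Mathlib
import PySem

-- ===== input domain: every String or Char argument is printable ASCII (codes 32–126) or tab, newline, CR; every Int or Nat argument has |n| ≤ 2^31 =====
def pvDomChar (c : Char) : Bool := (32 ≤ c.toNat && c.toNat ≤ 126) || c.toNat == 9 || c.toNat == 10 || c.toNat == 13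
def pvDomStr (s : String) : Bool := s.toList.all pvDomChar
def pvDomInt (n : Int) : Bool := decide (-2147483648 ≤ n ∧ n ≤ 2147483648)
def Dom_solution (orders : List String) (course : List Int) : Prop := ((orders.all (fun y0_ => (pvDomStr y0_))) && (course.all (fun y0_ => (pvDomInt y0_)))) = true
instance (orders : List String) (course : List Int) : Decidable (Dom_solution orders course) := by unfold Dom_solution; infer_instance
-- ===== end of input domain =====

-- B swaps A's hash-counting (Counter + most_common's sort by count) for a comparison-based
-- strategy: its own recursive combination generator yielding joined strings, then sort the
-- candidates and find the longest run and its keys by one run-length scan. Same return value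
-- everywhere A returns.

-- ===== PORT A =====
-- itertools.combinations(xs, n): tuples of elements in index order, lexicographic by index (exact port)
def pyCombinations (xs : List Char) (n : Nat) : List (List Char) :=
  match xs, n with
  | _, 0 => [[]]
  | [], _+1 => []
  | x :: rest, m+1 => (pyCombinations rest m).map (fun t => x :: t) ++ pyCombinations rest (m+1)

def solution (orders : List String) (course : List Int) : List String :=
  let result := course.foldl (fun result num =>
    let candidate := orders.foldl (fun cand order =>
      (pyCombinations (PySem.List.sorted order.toList (fun c => c) false) num.toNat).foldl
        (fun cand arr => cand ++ [String.ofList arr]) cand) []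
    let mc := PySem.List.sorted (PySem.Dict.counter candidate).items (fun p => p.2) true
    result ++ (match mc with
      | [] => []
      | (_, v0) :: _ => (mc.filter (fun p => decide (1 < p.2) && p.2 == v0)).map (fun p => p.1))) []
  PySem.List.sorted result (fun s => s) false

-- ===== PORT B =====
-- _combos(chars, k): sorted k-letter selections as joined strings, combinations order
def combosB : List Char → Int → List String
  | [], k => if k = 0 then [String.ofList []] else []
  | c :: rest, k =>
    if k = 0 then [String.ofList []]
    else if k < 0 ∨ ((c :: rest).length : Int) < k then []
    else (combosB rest (k - 1)).map (fun t => String.ofList (c :: t.toList)) ++ combosB rest k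

-- the run-length scan of Source B's for-loop (lookahead cand[i+1] ≠ x = rest.head? ≠ some x)
def runScan : List String → Int → Int → List String → Int × List String
  | [], _run, best, winners => (best, winners)
  | x :: rest, run, best, winners =>
    if rest.head? = some x then runScan rest (run + 1) best winners
    else if run + 1 > best then runScan rest 0 (run + 1) [x]
    else if run + 1 = best then runScan rest 0 best (winners ++ [x])
    else runScan rest 0 best winners

def solution_alt (orders : List String) (course : List Int) : List String :=
  let result := course.foldl (fun result num =>
    let cand := orders.foldl (fun cand order =>
      cand ++ combosB (PySem.List.sorted order.toList (fun c => c) false) num) []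
    let cand := PySem.List.sorted cand (fun s => s) false
    let bw := runScan cand 0 0 []
    if 1 < bw.1 then result ++ bw.2 else result) []
  PySem.List.sorted result (fun s => s) false

-- ===== PRECONDITION & SPEC =====
-- Pre_ excludes exactly the inputs where A raises: a negative course size alongside at least one
-- order, on which itertools.combinations(..., num) raises ValueError. With orders = [] the inner
-- loop never runs and A returns normally for any course.
def Pre_solution (orders : List String) (course : List Int) : Prop := orders = [] ∨ ∀ num ∈ course, 0 ≤ num
instance (orders : List String) (course : List Int) : Decidable (Pre_solution orders course) := by unfold Pre_solution; infer_instance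

def pvWitness_solution : List String × List Int := (["ABC", "CB"], [2])

def Spec_solution (orders : List String) (course : List Int) (out : List String) : Prop := out = solution_alt orders course
instance (orders : List String) (course : List Int) (out : List String) : Decidable (Spec_solution orders course out) := by unfold Spec_solution; infer_instance

-- ===== CLAIM (what is proved, stated in full; the proofs are below) =====
def Claim_equal_solution : Prop := ∀ (orders : List String) (course : List Int), Dom_solution orders course → Pre_solution orders course → Spec_solution orders course (solution orders course)

-- ===== LEMMAS AND PROOFS =====

-- pyCombinations of too few elements is empty
theorem pyCombinations_nil_of_lt : ∀ (xs : List Char) (n : Nat), xs.length < n → pyCombinations xs n = [] := by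
  intro xs
  induction xs with
  | nil => intro n h; cases n with | zero => omega | succ m => rfl
  | cons c rest ih =>
      intro n h
      cases n with
      | zero => omega
      | succ m =>
          simp only [pyCombinations]
          rw [ih m (by simpa using Nat.lt_of_succ_lt_succ h), ih (m+1) (by simp at h ⊢; omega)]
          simp

-- B's combination generator produces exactly A's joined combinations, in the same order
theorem combosB_eq : ∀ (chars : List Char) (num : Int), 0 ≤ num →
    combosB chars num = (pyCombinations chars num.toNat).map String.ofList := by
  intro chars
  induction chars with
  | nil =>
      intro num h0
      by_cases hz : num = 0
      · subst hz; simp [combosB, pyCombinations]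
      · obtain ⟨m, hm⟩ : ∃ m, num.toNat = m + 1 := ⟨num.toNat - 1, by omega⟩
        rw [combosB, if_neg hz, hm]
        rfl
  | cons c rest ih =>
      intro num h0
      by_cases hz : num = 0
      · subst hz; simp [combosB, pyCombinations]
      · by_cases hlen : ((c :: rest).length : Int) < num
        · rw [combosB, if_neg hz, if_pos (Or.inr hlen),
            pyCombinations_nil_of_lt _ _ (by simp at hlen ⊢; omega)]
          rfl
        · obtain ⟨m, hm⟩ : ∃ m, num.toNat = m + 1 := ⟨num.toNat - 1, by omega⟩
          rw [combosB, if_neg hz, if_neg (by rw [not_or]; exact ⟨by omega, by omega⟩)]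
          have h1 : (num - 1).toNat = m := by omega
          rw [ih (num - 1) (by omega), ih num h0, h1, hm]
          simp only [pyCombinations, List.map_append, List.map_map]
          congr 1
          apply List.map_congr_left
          intro t _
          simp [Function.comp, String.toList_ofList]

-- A's candidate-building double loop is the flat list of joined combinations.
theorem candA_eq (g : String → List (List Char)) :
    ∀ (orders : List String) (acc : List String),
      orders.foldl (fun cand order => (g order).foldl (fun cand arr => cand ++ [String.ofList arr]) cand) acc
        = acc ++ orders.flatMap (fun order => (g order).map String.ofList) := by
  intro orders
  induction orders with
  | nil => simp
  | cons o os ih =>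
      intro acc
      simp only [List.foldl_cons, List.flatMap_cons, PySem.List.foldl_append_singleton_eq_map]
      simp [List.flatMap_def, List.append_assoc]

-- selection step f of Source B's scan, as a fold over (key, run-length) pairs
def fStep (bw : Int × List String) (p : String × Int) : Int × List String :=
  if p.2 > bw.1 then (p.2, [p.1]) else if p.2 = bw.1 then (bw.1, bw.2 ++ [p.1]) else bw

-- run-length encoding with a pending-run counter, mirroring runScan's branch structure
def rleAux : List String → Int → List (String × Int)
  | [], _ => []
  | x :: rest, r => if rest.head? = some x then rleAux rest (r + 1) else (x, r + 1) :: rleAux rest 0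

-- the scan IS the fold of fStep over the run-length encoding
theorem runScan_eq_foldl : ∀ (s : List String) (r b : Int) (w : List String),
    runScan s r b w = (rleAux s r).foldl fStep (b, w) := by
  intro s
  induction s with
  | nil => intro r b w; rfl
  | cons x rest ih =>
      intro r b w
      by_cases h : rest.head? = some x
      · simp only [runScan, rleAux, if_pos h]; exact ih (r+1) b w
      · simp only [runScan, rleAux, if_neg h, List.foldl_cons, fStep]
        by_cases h1 : r + 1 > b
        · simp only [if_pos h1]; exact ih 0 (r + 1) [x]
        · simp only [if_neg h1]
          by_cases h2 : r + 1 = b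
          · simp only [h2]; exact ih 0 b (w ++ [x])
          · simp only [if_neg h2]; exact ih 0 b w

-- folding fStep computes the running maximum and, in order, the keys attaining it
theorem foldl_fStep_spec : ∀ (l : List (String × Int)) (b : Int) (w : List String),
    l.foldl fStep (b, w) =
      (l.foldl (fun a p => max a p.2) b,
        (if l.foldl (fun a p => max a p.2) b = b then w else [])
          ++ (l.filter (fun p => p.2 == l.foldl (fun a p => max a p.2) b)).map Prod.fst) := by
  intro l
  induction l with
  | nil => intro b w; simp
  | cons p l ih =>
      intro b w
      obtain ⟨k, v⟩ := p
      have hle : ∀ (a : Int), a ≤ l.foldl (fun a p => max a p.2) a := by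
        intro a
        have := (PySem.List.le_foldl_max (l.map Prod.snd) a).1
        rw [List.foldl_map] at this
        exact this
      simp only [List.foldl_cons, fStep]
      by_cases h1 : v > b
      · rw [if_pos h1]
        have hmb : max b v = v := by omega
        rw [ih v [k]]
        have hne : l.foldl (fun a p => max a p.2) v ≠ b := by
          have := hle v; omega
        simp only [hmb, if_neg hne, List.filter_cons, List.nil_append]
        by_cases hv : v = l.foldl (fun a p => max a p.2) v
        · simp [← hv]
        · have hv' : ¬ (l.foldl (fun a p => max a p.2) v = v) := fun hh => hv hh.symm
          simp [beq_iff_eq, hv, hv']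
      · rw [if_neg h1]
        by_cases h2 : v = b
        · rw [if_pos h2]
          have hmb : max b v = b := by omega
          rw [ih b (w ++ [k])]
          simp only [hmb, List.filter_cons]
          by_cases hv : l.foldl (fun a p => max a p.2) b = b
          · simp [hv, h2, List.append_assoc]
          · have : ¬ (v = l.foldl (fun a p => max a p.2) b) := by omega
            simp [hv, beq_iff_eq, this]
        · rw [if_neg h2]
          have hmb : max b v = b := by omega
          rw [ih b w]
          simp only [hmb, List.filter_cons]
          have hvb : v < b := by omega
          have : ¬ (v = l.foldl (fun a p => max a p.2) b) := by
            have := hle b; omega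
          simp [beq_iff_eq, this]

-- peeling one maximal run off the run-length encoding
theorem rleAux_peel : ∀ (kn : Nat) (x : String) (s' : List String) (r : Int), s'.head? ≠ some x →
    rleAux (List.replicate (kn + 1) x ++ s') r = (x, r + (kn + 1 : Nat)) :: rleAux s' 0 := by
  intro kn
  induction kn with
  | zero =>
      intro x s' r h
      have h1 : List.replicate (0 + 1) x ++ s' = x :: s' := by simp
      rw [h1]
      simp only [rleAux, if_neg h]
      norm_num
  | succ kn ih =>
      intro x s' r h
      have : List.replicate (kn + 1 + 1) x ++ s' = x :: (List.replicate (kn + 1) x ++ s') := by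
        simp [List.replicate_succ]
      rw [this]
      have hh : (List.replicate (kn + 1) x ++ s').head? = some x := by simp [List.replicate_succ]
      simp only [rleAux, if_pos hh, ih x s' (r + 1) h]
      congr 1
      push_cast
      ring_nf

-- a sorted nonempty list splits into its leading run and a sorted remainder free of the head
theorem sorted_split : ∀ (t : List String) (x : String), (x :: t).Pairwise (· ≤ ·) →
    ∃ (kn : Nat) (s' : List String), x :: t = List.replicate (kn + 1) x ++ s' ∧
      s'.head? ≠ some x ∧ s'.Pairwise (· ≤ ·) ∧ x ∉ s' := by
  intro t
  induction t with
  | nil => intro x _; exact ⟨0, [], by simp, by simp, by simp, by simp⟩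
  | cons y t' ih =>
      intro x h
      by_cases hyx : y = x
      · subst hyx
        obtain ⟨kn, s', heq, hh, hp, hmem⟩ := ih y h.tail
        exact ⟨kn + 1, s', by rw [List.replicate_succ, List.cons_append, ← heq], hh, hp, hmem⟩
      · refine ⟨0, y :: t', by simp, by simp [hyx], h.tail, ?_⟩
        intro hx
        rcases List.mem_cons.mp hx with h1 | h1
        · exact hyx h1.symm
        · exact hyx (le_antisymm (List.rel_of_pairwise_cons h (List.mem_cons_self))
            (List.rel_of_pairwise_cons h.tail h1)).symm

-- membership in the run-length encoding of a sorted list = (key in list, value = its count)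
theorem rleAux_mem : ∀ (n : Nat) (s : List String), s.length ≤ n → s.Pairwise (· ≤ ·) →
    ∀ (k : String) (v : Int), ((k, v) ∈ rleAux s 0 ↔ k ∈ s ∧ v = (s.count k : Int)) := by
  intro n
  induction n with
  | zero =>
      intro s hlen _ k v
      have hs : s = [] := List.eq_nil_of_length_eq_zero (by omega)
      subst hs; simp [rleAux]
  | succ n ih =>
      intro s hlen hsort k v
      cases s with
      | nil => simp [rleAux]
      | cons x t =>
          obtain ⟨kn, s', heq, hh, hp, hnm⟩ := sorted_split t x hsort
          have hlen' : s'.length ≤ n := by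
            have hL := congrArg List.length heq
            simp only [List.length_cons, List.length_append, List.length_replicate] at hL
            simp only [List.length_cons] at hlen
            omega
          have hcnt0 : s'.count x = 0 := List.count_eq_zero.mpr hnm
          rw [heq, rleAux_peel kn x s' 0 hh]
          by_cases hk : k = x
          · subst hk
            have hL2 : ((k, v) ∈ (k, 0 + ((kn + 1 : Nat) : Int)) :: rleAux s' 0) ↔ v = ((kn + 1 : Nat) : Int) := by
              simp only [List.mem_cons]
              constructor
              · rintro (he | hmem)
                · have := congrArg Prod.snd he
                  simpa using this
                · exact absurd ((ih s' hlen' hp k v).mp hmem).1 hnm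
              · intro hv
                left
                rw [Prod.ext_iff]
                exact ⟨rfl, by simpa using hv⟩
            rw [hL2]
            simp only [List.mem_append, List.mem_replicate, List.count_append,
              List.count_replicate, hcnt0, beq_self_eq_true, if_true]
            constructor
            · intro hv
              refine ⟨by simp, ?_⟩
              push_cast at hv ⊢; omega
            · rintro ⟨_, hv⟩
              push_cast at hv ⊢; omega
          · have hbk : ¬ ((x == k) = true) := by simp [Ne.symm hk]
            have hL2 : ((k, v) ∈ (x, 0 + ((kn + 1 : Nat) : Int)) :: rleAux s' 0) ↔ (k, v) ∈ rleAux s' 0 := by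
              simp only [List.mem_cons]
              constructor
              · rintro (he | hmem)
                · exact absurd (congrArg Prod.fst he) (by simpa using hk)
                · exact hmem
              · exact Or.inr
            rw [hL2, ih s' hlen' hp k v]
            simp only [List.mem_append, List.mem_replicate, List.count_append,
              List.count_replicate, hbk]
            constructor
            · rintro ⟨hm, hv⟩
              exact ⟨Or.inr hm, by simpa using hv⟩
            · rintro ⟨hm, hv⟩
              rcases hm with ⟨_, hm⟩ | hm
              · exact absurd hm hk
              · exact ⟨hm, by simpa using hv⟩

-- the keys of the run-length encoding of a sorted list are distinct
theorem rleAux_keys_nodup : ∀ (n : Nat) (s : List String), s.length ≤ n → s.Pairwise (· ≤ ·) →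
    ((rleAux s 0).map Prod.fst).Nodup := by
  intro n
  induction n with
  | zero =>
      intro s hlen _
      have : s = [] := List.eq_nil_of_length_eq_zero (by omega)
      subst this; simp [rleAux]
  | succ n ih =>
      intro s hlen hsort
      cases s with
      | nil => simp [rleAux]
      | cons x t =>
          obtain ⟨kn, s', heq, hh, hp, hnm⟩ := sorted_split t x hsort
          rw [heq, rleAux_peel kn x s' 0 hh]
          have hlen' : s'.length ≤ n := by
            have hL := congrArg List.length heq
            simp only [List.length_cons, List.length_append, List.length_replicate] at hL
            simp only [List.length_cons] at hlen
            omega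
          simp only [List.map_cons, List.nodup_cons]
          refine ⟨?_, ih s' hlen' hp⟩
          intro hx
          obtain ⟨⟨k', v'⟩, hmem, hk⟩ := List.mem_map.mp hx
          simp at hk
          exact hnm (hk ▸ ((rleAux_mem n s' hlen' hp k' v').mp hmem).1)

-- the run-length encoding of sorted(cand) is a permutation of Counter(cand).items()
theorem rle_perm_items (cand : List String) :
    (rleAux (PySem.List.sorted cand (fun s => s) false) 0).Perm (PySem.Dict.counter cand).items := by
  set s := PySem.List.sorted cand (fun x => x) false with hs
  have hsort : s.Pairwise (· ≤ ·) := PySem.List.sorted_pairwise cand (fun x => x)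
  have hperm : s.Perm cand := PySem.List.sorted_perm cand (fun x => x) false
  have hnd1 : (rleAux s 0).Nodup :=
    List.Nodup.of_map Prod.fst (rleAux_keys_nodup s.length s le_rfl hsort)
  have hitems : (PySem.Dict.counter cand).items
      = (PySem.Set.ofList cand).map (fun k => (k, (cand.count k : Int))) :=
    PySem.Dict.items_counter cand
  have hnd2 : (PySem.Dict.counter cand).items.Nodup := by
    rw [hitems]
    exact (PySem.Set.nodup_ofList cand).map (fun a b hab => by simpa using congrArg Prod.fst hab)
  refine (List.perm_ext_iff_of_nodup hnd1 hnd2).mpr ?_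
  rintro ⟨k, v⟩
  rw [rleAux_mem s.length s le_rfl hsort k v, hitems]
  constructor
  · rintro ⟨hm, hv⟩
    refine List.mem_map.mpr ⟨k, (PySem.Set.mem_ofList cand k).mpr (hperm.mem_iff.mp hm), ?_⟩
    rw [hv, hperm.count_eq]
  · intro h
    obtain ⟨k', hk', hke⟩ := List.mem_map.mp h
    have h1 := congrArg Prod.fst hke
    have h2 := congrArg Prod.snd hke
    dsimp at h1 h2
    rw [h1] at hk' h2
    exact ⟨hperm.mem_iff.mpr ((PySem.Set.mem_ofList cand k).mp hk'), by rw [← h2, hperm.count_eq]⟩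

-- running max from 0 over a list of positive values is Python's max(..., default=0)
theorem foldl_max_eq_maxD (l : List Int) (h : ∀ v ∈ l, 1 ≤ v) :
    l.foldl max 0 = PySem.List.maxD l (fun v => v) 0 := by
  cases l with
  | nil => rfl
  | cons x t =>
      have hx : (1:Int) ≤ x := h x (List.mem_cons_self)
      simp only [PySem.List.maxD, PySem.List.max?_id_cons, Option.getD_some, List.foldl_cons]
      congr 1
      omega

-- the scanned best equals the maximum counter value, and the winners are (a permutation of)
-- the counter keys attaining it
theorem scan_characterisation (cand : List String) :
    (runScan (PySem.List.sorted cand (fun s => s) false) 0 0 []).1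
        = PySem.List.maxD (PySem.Dict.counter cand).values (fun v => v) 0
    ∧ ((runScan (PySem.List.sorted cand (fun s => s) false) 0 0 []).2).Perm
        (((PySem.Dict.counter cand).items.filter
            (fun p => p.2 == PySem.List.maxD (PySem.Dict.counter cand).values (fun v => v) 0)).map Prod.fst) := by
  set s := PySem.List.sorted cand (fun x => x) false with hs
  have hsort : s.Pairwise (· ≤ ·) := PySem.List.sorted_pairwise cand (fun x => x)
  have hpairs : (rleAux s 0).Perm (PySem.Dict.counter cand).items := rle_perm_items cand
  have hvalperm : ((rleAux s 0).map Prod.snd).Perm (PySem.Dict.counter cand).values :=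
    hpairs.map Prod.snd
  have hpos : ∀ v ∈ (PySem.Dict.counter cand).values, 1 ≤ v := by
    intro v hv
    obtain ⟨⟨k, v'⟩, hm, he⟩ := List.mem_map.mp hv
    rw [PySem.Dict.items_counter cand] at hm
    obtain ⟨k', hk', hke⟩ := List.mem_map.mp hm
    have h2 := congrArg Prod.snd hke
    dsimp at h2
    have hmem2 : k' ∈ cand := (PySem.Set.mem_ofList cand k').mp hk'
    have hpos' : 0 < cand.count k' := List.count_pos_iff.mpr hmem2
    dsimp at he
    rw [← he, ← h2]
    omega
  have hmax : (rleAux s 0).foldl (fun a p => max a p.2) 0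
      = PySem.List.maxD (PySem.Dict.counter cand).values (fun v => v) 0 := by
    rw [← List.foldl_map (f := Prod.snd) (g := max),
      @List.Perm.foldl_eq _ _ max _ _ ⟨fun b a₁ a₂ => max_right_comm b a₁ a₂⟩ hvalperm 0]
    exact foldl_max_eq_maxD _ hpos
  rw [runScan_eq_foldl s 0 0 [], foldl_fStep_spec (rleAux s 0) 0 []]
  constructor
  · exact hmax
  · simp only [hmax]
    have : (if PySem.List.maxD (PySem.Dict.counter cand).values (fun v => v) 0 = 0
        then ([] : List String) else []) = [] := by split <;> rfl
    rw [this, List.nil_append]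
    exact (hpairs.filter _).map _

-- A's most_common selection is a permutation of "keys whose count is the positive maximum"
theorem sel_perm (cand : List String) :
    (match PySem.List.sorted (PySem.Dict.counter cand).items (fun p => p.2) true with
      | [] => ([] : List String)
      | (_, v0) :: _ =>
          ((PySem.List.sorted (PySem.Dict.counter cand).items (fun p => p.2) true).filter
              (fun (p : String × Int) => decide (1 < p.2) && p.2 == v0)).map (fun (p : String × Int) => p.1)).Perm
    (if 1 < PySem.List.maxD (PySem.Dict.counter cand).values (fun v => v) 0 then
        ((PySem.Dict.counter cand).items.filter
            (fun (p : String × Int) => p.2 == PySem.List.maxD (PySem.Dict.counter cand).values (fun v => v) 0)).map (fun (p : String × Int) => p.1)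
      else []) := by
  set items := (PySem.Dict.counter cand).items with hitems
  set vals := (PySem.Dict.counter cand).values with hvals
  have hvals' : vals = items.map (fun p => p.2) := rfl
  rcases hmc : PySem.List.sorted items (fun p => p.2) true with _ | ⟨⟨k0, v0⟩, t⟩
  · have h0 : items = [] := (PySem.List.sorted_eq_nil_iff items (fun p => p.2) true).mp hmc
    simp [h0, hvals', PySem.List.maxD, PySem.List.max?]
  · have hub : ∀ y ∈ items, y.2 ≤ v0 :=
      PySem.List.key_head_sorted_rev_ge items (fun p => p.2) hmc
    have hmem : (k0, v0) ∈ items := by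
      have : ((k0, v0) : String × Int) ∈ PySem.List.sorted items (fun p => p.2) true := by
        rw [hmc]; exact List.mem_cons_self
      exact (PySem.List.mem_sorted items (fun p => p.2) true _).mp this
    have hv0 : v0 ∈ vals := by
      rw [hvals']; exact List.mem_map_of_mem hmem
    have hmax : PySem.List.maxD vals (fun v => v) 0 = v0 := by
      rcases hm : PySem.List.max? vals (fun v => v) with _ | m
      · exact absurd ((PySem.List.max?_eq_none_iff vals (fun v => v)).mp hm)
          (by intro h; rw [h] at hv0; exact (List.not_mem_nil) hv0)
      · have hmm : m ∈ vals := PySem.List.max?_mem hm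
        have h1 : m ≤ v0 := by
          rw [hvals'] at hmm
          rcases List.mem_map.mp hmm with ⟨p, hp, hpe⟩
          rw [← hpe]; exact hub p hp
        have h2 : v0 ≤ m := PySem.List.max?_isMax hm v0 hv0
        simp [PySem.List.maxD, hm, le_antisymm h1 h2]
    have hperm : ((k0, v0) :: t).Perm items := hmc ▸ PySem.List.sorted_perm items (fun p => p.2) true
    rw [hmax]
    dsimp only
    by_cases hbig : 1 < v0
    · simp only [if_pos hbig]
      have hfeq : ((k0, v0) :: t).filter (fun p => decide (1 < p.2) && p.2 == v0)
          = ((k0, v0) :: t).filter (fun p => p.2 == v0) := by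
        apply List.filter_congr
        intro p _
        by_cases hpe : p.2 = v0
        · simp [hpe, hbig]
        · simp [hpe]
      rw [hfeq]
      exact (hperm.filter _).map _
    · simp only [if_neg hbig]
      have hnil : ((k0, v0) :: t).filter (fun p => decide (1 < p.2) && p.2 == v0) = [] := by
        apply List.filter_eq_nil_iff.mpr
        intro p _
        by_cases hpe : p.2 = v0
        · simp [hpe, hbig]
        · simp [hpe]
      simp [hnil]

-- the two per-course-size loops keep permutation-equivalent accumulators
theorem result_perm (orders : List String) :
    ∀ (course : List Int), (orders = [] ∨ ∀ num ∈ course, 0 ≤ num) →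
      ∀ (accA accB : List String), accA.Perm accB →
      (course.foldl (fun result num =>
        let candidate := orders.foldl (fun cand order =>
          (pyCombinations (PySem.List.sorted order.toList (fun c => c) false) num.toNat).foldl
            (fun cand arr => cand ++ [String.ofList arr]) cand) []
        let mc := PySem.List.sorted (PySem.Dict.counter candidate).items (fun p => p.2) true
        result ++ (match mc with
          | [] => []
          | (_, v0) :: _ => (mc.filter (fun p => decide (1 < p.2) && p.2 == v0)).map (fun p => p.1))) accA).Perm
      (course.foldl (fun result num =>
        let cand := orders.foldl (fun cand order =>
          cand ++ combosB (PySem.List.sorted order.toList (fun c => c) false) num) []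
        let cand := PySem.List.sorted cand (fun s => s) false
        let bw := runScan cand 0 0 []
        if 1 < bw.1 then result ++ bw.2 else result) accB) := by
  intro course
  induction course with
  | nil => intro _ accA accB h; simpa using h
  | cons num rest ih =>
      intro hpre accA accB h
      simp only [List.foldl_cons]
      refine ih (hpre.imp id (fun h' n hn => h' n (List.mem_cons_of_mem _ hn))) _ _ ?_
      dsimp only
      have hA := candA_eq (fun order => pyCombinations (PySem.List.sorted order.toList (fun c => c) false) num.toNat) orders []
      have hB := PySem.List.foldl_append_eq_flatMap (fun order => combosB (PySem.List.sorted order.toList (fun c => c) false) num) orders []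
      beta_reduce at hA hB
      rw [hA, hB]
      simp only [List.nil_append]
      have hcand : orders.flatMap (fun order => combosB (PySem.List.sorted order.toList (fun c => c) false) num)
          = orders.flatMap (fun order =>
              (pyCombinations (PySem.List.sorted order.toList (fun c => c) false) num.toNat).map String.ofList) := by
        rcases hpre with h0 | hnn
        · rw [h0]; rfl
        · exact List.flatMap_congr (fun o _ => combosB_eq _ num (hnn num List.mem_cons_self))
      rw [hcand]
      set flat := orders.flatMap (fun order =>
        (pyCombinations (PySem.List.sorted order.toList (fun c => c) false) num.toNat).map String.ofList) with hflat
      obtain ⟨hbest, hwin⟩ := scan_characterisation flat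
      have hsel := sel_perm flat
      rw [hbest]
      set M := PySem.List.maxD (PySem.Dict.counter flat).values (fun v => v) 0 with hM
      by_cases hbig : 1 < M
      · simp only [if_pos hbig] at hsel ⊢
        exact h.append (hsel.trans hwin.symm)
      · simp only [if_neg hbig] at hsel ⊢
        simpa using h.append hsel

-- ===== VERDICT (by name: the statement is the Claim_ definition above) =====
theorem solution_spec : Claim_equal_solution := by
  intro orders course _ hpre
  unfold Spec_solution solution solution_alt
  have hperm := result_perm orders course hpre [] [] (List.Perm.refl [])
  exact PySem.List.sorted_eq_sorted_of_perm _ _ (fun s => s) (fun a b h => h) hperm
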